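-- pv_equiv track=rewrite | github.com/rustleupchef/codewars | 2023practice/problem_26/main.py | grabFactors
-- ===== SOURCE A (Python) =====
-- def grabFactors(num: int, needs=tuple()):
--     factors = []
--     for i in range(1, num + 1):
--         if i == 1 or i == num:
--             continue
--         if num % i == 0:
--             factors.append(sorted(needs + (i, num // i)))
--             seed1 = grabFactors(i, needs + (num // i, ))
--             if seed1:
--                 factors.extend(sorted(seed1))
--     return tuple(factors)
-- ===== SOURCE B (Python) =====
-- def grabFactors(num: int, needs=tuple()):
--     # proper divisors (strictly between 1 and num) by trial division up to sqrt(num):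
--     # small divisors, then their cofactors, in ascending order
--     small = []
--     d = 2
--     while d * d <= num:
--         if num % d == 0:
--             small.append(d)
--         d += 1
--     divs = small + [num // d for d in reversed(small) if num // d != d]
--     factors = []
--     for i in divs:
--         factors.append(sorted(needs + (i, num // i)))
--         sub = grabFactors(i, needs + (num // i,))
--         if sub:
--             factors.extend(sorted(sub))
--     return tuple(factors)
-- ===== Notes on version B (the rewrite author's own statement) =====
-- stated objective: alternative
-- what changed: Each node's divisors are found by a sqrt(num) trial-division scan (small divisors plus their cofactors, emitted in ascending order) instead of scanning every i in range(1, num+1); the shared recursive emission dominates runtime, so overall speed is unchanged.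
import Mathlib
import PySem

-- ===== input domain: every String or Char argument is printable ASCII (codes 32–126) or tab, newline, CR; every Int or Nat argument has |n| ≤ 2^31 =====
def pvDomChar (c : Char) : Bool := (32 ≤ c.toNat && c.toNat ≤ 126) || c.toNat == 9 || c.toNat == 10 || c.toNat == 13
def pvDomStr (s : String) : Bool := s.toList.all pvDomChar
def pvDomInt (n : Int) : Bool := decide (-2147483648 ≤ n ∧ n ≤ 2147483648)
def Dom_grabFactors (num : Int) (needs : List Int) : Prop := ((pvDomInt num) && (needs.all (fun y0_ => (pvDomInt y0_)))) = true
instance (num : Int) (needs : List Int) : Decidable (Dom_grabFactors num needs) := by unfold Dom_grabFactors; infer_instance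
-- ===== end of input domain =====

-- B finds each node's divisors by trial division up to sqrt(num) (small divisors, then their
-- cofactors, in ascending order) instead of A's scan of the whole range(1, num+1); same return value.
-- Both ports use a fuel argument of num.toNat + 1 purely as a totality guard: every recursive
-- call descends to a divisor i with 2 ≤ i < num, so the fuel-0 branch is never reached.

-- ===== PORT A =====
def grabFactorsGo (fuel : Nat) (num : Int) (needs : List Int) : List (List Int) :=
  match fuel with
  | 0 => []
  | fuel + 1 =>
    (PySem.List.pyRange 1 (num + 1) 1).foldl
      (fun factors i =>
        if i = 1 ∨ i = num then factors
        else if PySem.Int.mod num i = 0 then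
          let factors := factors ++ [PySem.List.sorted (needs ++ [i, PySem.Int.floordiv num i]) (fun x => x) false]
          let seed1 := grabFactorsGo fuel i (needs ++ [PySem.Int.floordiv num i])
          if seed1 ≠ [] then factors ++ PySem.List.sorted seed1 (fun x => x) false
          else factors
        else factors)
      []

def grabFactors (num : Int) (needs : List Int) : List (List Int) :=
  grabFactorsGo (num.toNat + 1) num needs

-- ===== PORT B =====
-- the 'while d * d <= num' loop of Source B (the loop runs at most num.toNat times: d*d ≤ num forces d ≤ num)
def pvSmallLoop (fuel : Nat) (num d : Int) (small : List Int) : List Int :=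
  match fuel with
  | 0 => small
  | fuel + 1 =>
    if d * d ≤ num then
      pvSmallLoop fuel num (d + 1) (if PySem.Int.mod num d = 0 then small ++ [d] else small)
    else small

-- 'divs = small + [num // d for d in reversed(small) if num // d != d]' of Source B
def grabFactors_altDivs (num : Int) : List Int :=
  let small := pvSmallLoop (num.toNat + 1) num 2 []
  small ++ (small.reverse.filter (fun d => decide (PySem.Int.floordiv num d ≠ d))).map
    (fun d => PySem.Int.floordiv num d)

def grabFactors_altGo (fuel : Nat) (num : Int) (needs : List Int) : List (List Int) :=
  match fuel with
  | 0 => []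
  | fuel + 1 =>
    (grabFactors_altDivs num).foldl
      (fun factors i =>
        let factors := factors ++ [PySem.List.sorted (needs ++ [i, PySem.Int.floordiv num i]) (fun x => x) false]
        let sub := grabFactors_altGo fuel i (needs ++ [PySem.Int.floordiv num i])
        if sub ≠ [] then factors ++ PySem.List.sorted sub (fun x => x) false
        else factors)
      []

def grabFactors_alt (num : Int) (needs : List Int) : List (List Int) :=
  grabFactors_altGo (num.toNat + 1) num needs

-- ===== PRECONDITION & SPEC =====
def Spec_grabFactors (num : Int) (needs : List Int) (out : List (List Int)) : Prop := out = grabFactors_alt num needs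
instance (num : Int) (needs : List Int) (out : List (List Int)) : Decidable (Spec_grabFactors num needs out) := by unfold Spec_grabFactors; infer_instance

-- ===== CLAIM (what is proved, stated in full; the proofs are below) =====
def Claim_equal_grabFactors : Prop := ∀ (num : Int) (needs : List Int), Dom_grabFactors num needs → Spec_grabFactors num needs (grabFactors num needs)

-- ===== LEMMAS AND PROOFS =====

-- the body both loops execute for a divisor i: append the sorted entry, then the sorted recursive seed
def pvEmit (F : Int → List Int → List (List Int)) (num : Int) (needs : List Int) (i : Int) : List (List Int) :=
  let entry := PySem.List.sorted (needs ++ [i, PySem.Int.floordiv num i]) (fun x => x) false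
  let sub := F i (needs ++ [PySem.Int.floordiv num i])
  if sub ≠ [] then entry :: PySem.List.sorted sub (fun x => x) false else [entry]

theorem grabFactorsGo_eq_flatMap (fuel : Nat) (num : Int) (needs : List Int) :
    grabFactorsGo (fuel + 1) num needs =
      ((PySem.List.pyRange 1 (num + 1) 1).filter
          (fun i => decide (¬(i = 1 ∨ i = num) ∧ PySem.Int.mod num i = 0))).flatMap
        (pvEmit (grabFactorsGo fuel) num needs) := by
  show (PySem.List.pyRange 1 (num + 1) 1).foldl _ [] = _
  have hf : (fun (factors : List (List Int)) (i : Int) =>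
      if i = 1 ∨ i = num then factors
      else if PySem.Int.mod num i = 0 then
        let factors := factors ++ [PySem.List.sorted (needs ++ [i, PySem.Int.floordiv num i]) (fun x => x) false]
        let seed1 := grabFactorsGo fuel i (needs ++ [PySem.Int.floordiv num i])
        if seed1 ≠ [] then factors ++ PySem.List.sorted seed1 (fun x => x) false
        else factors
      else factors)
      = fun acc i =>
        if (¬(i = 1 ∨ i = num) ∧ PySem.Int.mod num i = 0) then
          acc ++ pvEmit (grabFactorsGo fuel) num needs i
        else acc := by
    funext acc i
    simp only [pvEmit]
    split_ifs <;> simp_all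
  rw [hf, PySem.List.foldl_ite_eq_foldl_filter, PySem.List.foldl_append_eq_flatMap, List.nil_append]

theorem grabFactors_altGo_eq_flatMap (fuel : Nat) (num : Int) (needs : List Int) :
    grabFactors_altGo (fuel + 1) num needs =
      (grabFactors_altDivs num).flatMap (pvEmit (grabFactors_altGo fuel) num needs) := by
  show (grabFactors_altDivs num).foldl _ [] = _
  have hf : (fun (factors : List (List Int)) (i : Int) =>
        let factors := factors ++ [PySem.List.sorted (needs ++ [i, PySem.Int.floordiv num i]) (fun x => x) false]
        let sub := grabFactors_altGo fuel i (needs ++ [PySem.Int.floordiv num i])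
        if sub ≠ [] then factors ++ PySem.List.sorted sub (fun x => x) false
        else factors)
      = fun acc i => acc ++ pvEmit (grabFactors_altGo fuel) num needs i := by
    funext acc i
    simp only [pvEmit]
    split <;> simp
  rw [hf, PySem.List.foldl_append_eq_flatMap, List.nil_append]

theorem pvSmallLoop_eq (num : Int) :
    ∀ (fuel : Nat) (d : Int) (small : List Int), 2 ≤ d → (num + 1 - d).toNat < fuel →
      pvSmallLoop fuel num d small =
        small ++ (PySem.List.pyRange d (num + 1) 1).filter
          (fun e => decide (e * e ≤ num) && decide (PySem.Int.mod num e = 0)) := by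
  intro fuel
  induction fuel with
  | zero => intro d small _ h; omega
  | succ fuel ih =>
    intro d small hd2 hfuel
    show (if d * d ≤ num then
        pvSmallLoop fuel num (d + 1) (if PySem.Int.mod num d = 0 then small ++ [d] else small)
      else small) = _
    by_cases h : d * d ≤ num
    · have hdn : d ≤ num := by nlinarith
      rw [if_pos h, PySem.List.pyRange_one_cons (by omega), List.filter_cons]
      rw [ih (d + 1) _ (by omega) (by omega)]
      by_cases hm : PySem.Int.mod num d = 0 <;> simp [hm, h]
    · rw [if_neg h]
      have hnil : (PySem.List.pyRange d (num + 1) 1).filter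
          (fun e => decide (e * e ≤ num) && decide (PySem.Int.mod num e = 0)) = [] := by
        rw [List.filter_eq_nil_iff]
        intro e he
        have := PySem.List.mem_pyRange_one.mp he
        have : ¬ (e * e ≤ num) := by nlinarith
        simp [this]
      rw [hnil, List.append_nil]

theorem small_eq (num : Int) :
    pvSmallLoop (num.toNat + 1) num 2 [] =
      (PySem.List.pyRange 2 (num + 1) 1).filter
        (fun e => decide (e * e ≤ num) && decide (PySem.Int.mod num e = 0)) := by
  rw [pvSmallLoop_eq num (num.toNat + 1) 2 [] (by norm_num) (by omega), List.nil_append]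

theorem mem_small (num x : Int) :
    x ∈ pvSmallLoop (num.toNat + 1) num 2 [] ↔
      2 ≤ x ∧ x ≤ num ∧ x * x ≤ num ∧ PySem.Int.mod num x = 0 := by
  rw [small_eq]
  simp only [List.mem_filter, PySem.List.mem_pyRange_one, Bool.and_eq_true, decide_eq_true_eq]
  constructor
  · rintro ⟨⟨h1, h2⟩, h3, h4⟩
    exact ⟨h1, by omega, h3, h4⟩
  · rintro ⟨h1, h2, h3, h4⟩
    exact ⟨⟨h1, by omega⟩, h3, h4⟩

theorem mem_altDivs (num i : Int) :
    i ∈ grabFactors_altDivs num ↔ 2 ≤ i ∧ i < num ∧ i ∣ num := by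
  unfold grabFactors_altDivs
  simp only [List.mem_append, List.mem_map, List.mem_filter, List.mem_reverse,
    decide_eq_true_eq]
  constructor
  · rintro (hi | ⟨d, ⟨hd, hne⟩, rfl⟩)
    · obtain ⟨h2, hle, hsq, hmod⟩ := (mem_small num i).mp hi
      exact ⟨h2, by nlinarith, (PySem.Int.mod_eq_zero_iff_dvd num i).mp hmod⟩
    · obtain ⟨h2, hle, hsq, hmod⟩ := (mem_small num d).mp hd
      have hdpos : (0:Int) < d := by omega
      have hnum : (0:Int) < num := by nlinarith
      have hdvd : d ∣ num := (PySem.Int.mod_eq_zero_iff_dvd num d).mp hmod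
      have hfd : PySem.Int.floordiv num d = num / d := PySem.Int.floordiv_eq_ediv_of_pos hdpos
      have hmul : d * (num / d) = num := Int.mul_ediv_cancel' hdvd
      rw [hfd] at hne ⊢
      have hled : d ≤ num / d := by nlinarith
      have hlt : d < num / d := lt_of_le_of_ne hled (Ne.symm hne)
      refine ⟨by omega, by nlinarith, ⟨d, by linarith [hmul]⟩⟩
  · rintro ⟨h2, hlt, hdvd⟩
    have hipos : (0:Int) < i := by omega
    have hnum : (0:Int) < num := by omega
    by_cases hsq : i * i ≤ num
    · exact Or.inl ((mem_small num i).mpr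
        ⟨h2, by omega, hsq, (PySem.Int.mod_eq_zero_iff_dvd num i).mpr hdvd⟩)
    · right
      have hmul : i * (num / i) = num := Int.mul_ediv_cancel' hdvd
      set d := num / i with hd
      have hdpos : (0:Int) < d := by nlinarith
      have hdlt : d < i := by nlinarith
      have hd2 : 2 ≤ d := by
        rcases (by omega : d = 1 ∨ 2 ≤ d) with h1 | h2'
        · exfalso; rw [h1] at hmul; omega
        · exact h2'
      have hddvd : d ∣ num := ⟨i, by linarith [hmul]⟩
      have hfd : PySem.Int.floordiv num d = num / d := PySem.Int.floordiv_eq_ediv_of_pos hdpos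
      have hnumdi : num / d = i := by
        have : num = d * i := by linarith [hmul]
        rw [this, Int.mul_ediv_cancel_left i (by omega)]
      refine ⟨d, ⟨(mem_small num d).mpr ⟨hd2, by nlinarith, by nlinarith,
        (PySem.Int.mod_eq_zero_iff_dvd num d).mpr hddvd⟩, ?_⟩, ?_⟩
      · rw [hfd, hnumdi]; omega
      · rw [hfd, hnumdi]

theorem divs_alt_bound (num : Int) : ∀ i ∈ grabFactors_altDivs num, 2 ≤ i ∧ i < num := by
  intro i hi
  obtain ⟨h2, hlt, _⟩ := (mem_altDivs num i).mp hi
  exact ⟨h2, hlt⟩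

theorem pairwise_small (num : Int) : (pvSmallLoop (num.toNat + 1) num 2 []).Pairwise (· < ·) := by
  rw [small_eq]
  exact (PySem.List.pairwise_lt_pyRange_one 2 (num + 1)).filter _

theorem pairwise_altDivs (num : Int) : (grabFactors_altDivs num).Pairwise (· < ·) := by
  unfold grabFactors_altDivs
  have hdivfacts : ∀ a ∈ pvSmallLoop (num.toNat + 1) num 2 [], (0:Int) < num →
      0 < a ∧ a * (num / a) = num ∧ 0 < num / a := by
    intro a ha hnum
    obtain ⟨h2, _, _, hmod⟩ := (mem_small num a).mp ha
    have hdvd := (PySem.Int.mod_eq_zero_iff_dvd num a).mp hmod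
    have hmul : a * (num / a) = num := Int.mul_ediv_cancel' hdvd
    exact ⟨by omega, hmul, by nlinarith⟩
  refine List.pairwise_append.mpr ⟨pairwise_small num, ?_, ?_⟩
  · rw [List.pairwise_map]
    have hrev : ((pvSmallLoop (num.toNat + 1) num 2 []).reverse.filter
        (fun d => decide (PySem.Int.floordiv num d ≠ d))).Pairwise (· > ·) :=
      (List.pairwise_reverse.mpr ((pairwise_small num).imp (fun h => h))).filter _
    refine hrev.imp_of_mem ?_
    intro a b ha hb hab
    have ha' : a ∈ pvSmallLoop (num.toNat + 1) num 2 [] :=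
      List.mem_reverse.mp (List.mem_of_mem_filter ha)
    have hb' : b ∈ pvSmallLoop (num.toNat + 1) num 2 [] :=
      List.mem_of_mem_filter hb |> List.mem_reverse.mp
    obtain ⟨h2a, _, hsqa, _⟩ := (mem_small num a).mp ha'
    have hnum : (0:Int) < num := by nlinarith
    obtain ⟨hapos, hamul, haq⟩ := hdivfacts a ha' hnum
    obtain ⟨hbpos, hbmul, hbq⟩ := hdivfacts b hb' hnum
    rw [PySem.Int.floordiv_eq_ediv_of_pos hapos, PySem.Int.floordiv_eq_ediv_of_pos hbpos]
    by_contra hc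
    have hc' : num / b ≤ num / a := Int.not_lt.mp hc
    have h1 : a * (num / b) ≤ a * (num / a) := mul_le_mul_of_nonneg_left hc' (by omega)
    have h2' : b * (num / b) < a * (num / b) := mul_lt_mul_of_pos_right hab hbq
    linarith
  · intro s hs l hl
    simp only [List.mem_map, List.mem_filter, List.mem_reverse, decide_eq_true_eq] at hl
    obtain ⟨d, ⟨hd, hne⟩, rfl⟩ := hl
    obtain ⟨h2s, _, hsqs, _⟩ := (mem_small num s).mp hs
    obtain ⟨h2d, _, hsqd, _⟩ := (mem_small num d).mp hd
    have hnum : (0:Int) < num := by nlinarith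
    obtain ⟨hdpos, hdmul, hdq⟩ := hdivfacts d hd hnum
    rw [PySem.Int.floordiv_eq_ediv_of_pos hdpos] at hne ⊢
    have hled : d ≤ num / d := by nlinarith
    have hlt : d < num / d := lt_of_le_of_ne hled (Ne.symm hne)
    have hsq : num < (num / d) * (num / d) := by nlinarith
    nlinarith

theorem pv_sorted_ext (l1 l2 : List Int) (h1 : l1.Pairwise (· < ·)) (h2 : l2.Pairwise (· < ·))
    (h : ∀ x, x ∈ l1 ↔ x ∈ l2) : l1 = l2 :=
  List.Perm.eq_of_pairwise (fun _ _ _ _ hab hba => by omega) h1 h2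
    ((List.perm_ext_iff_of_nodup (h1.imp ne_of_lt) (h2.imp ne_of_lt)).mpr h)

theorem divs_eq (num : Int) :
    (PySem.List.pyRange 1 (num + 1) 1).filter
        (fun i => decide (¬(i = 1 ∨ i = num) ∧ PySem.Int.mod num i = 0)) =
      grabFactors_altDivs num := by
  apply pv_sorted_ext
  · exact (PySem.List.pairwise_lt_pyRange_one 1 (num + 1)).filter _
  · exact pairwise_altDivs num
  · intro x
    rw [mem_altDivs]
    simp only [List.mem_filter, PySem.List.mem_pyRange_one, decide_eq_true_eq]
    rw [PySem.Int.mod_eq_zero_iff_dvd]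
    constructor
    · rintro ⟨⟨ha, hb⟩, hno, hdvd⟩
      exact ⟨by omega, by omega, hdvd⟩
    · rintro ⟨h2, hlt, hdvd⟩
      exact ⟨⟨by omega, by omega⟩, by omega, hdvd⟩

theorem pvMain : ∀ (fuel : Nat) (num : Int), num.toNat < fuel →
    ∀ needs, grabFactorsGo fuel num needs = grabFactors_altGo fuel num needs := by
  intro fuel
  induction fuel with
  | zero => intro num h; omega
  | succ fuel ih =>
    intro num hnum needs
    rw [grabFactorsGo_eq_flatMap, grabFactors_altGo_eq_flatMap, divs_eq]
    rw [List.flatMap_def, List.flatMap_def]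
    congr 1
    apply List.map_congr_left
    intro i hi
    have hbound := divs_alt_bound num i hi
    have hrec : grabFactorsGo fuel i (needs ++ [PySem.Int.floordiv num i])
        = grabFactors_altGo fuel i (needs ++ [PySem.Int.floordiv num i]) :=
      ih i (by omega) _
    simp only [pvEmit, hrec]

-- ===== VERDICT (by name: the statement is the Claim_ definition above) =====
theorem grabFactors_spec : Claim_equal_grabFactors := by
  intro num needs _
  unfold Spec_grabFactors grabFactors grabFactors_alt
  exact pvMain (num.toNat + 1) num (by omega) needs
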